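-- pv_equiv track=rewrite | github.com/alexbaucom17/AdventOfCode | AdventOfCode2020/day21/day21.py | match_allergens_blind
-- ===== SOURCE A (Python) =====
-- import operator
--
-- INGREDIENT_ID = 0
--
-- ALLERGEN_ID = 1
--
-- def count_all_items(data, id):
--     counts = {}
--     ingredient_counts = {}
--     for line in data:
--         item = line[id]
--         for i in item:
--             if i in counts.keys():
--                 counts[i] += 1
--             else:
--                 counts[i] = 1
--     return counts
--
-- def try_identify_allergen_blind(allergen, data):
--
--     # Find all rows with the specific allergen
--     rows_with_allergen = []
--     for row in data:
--         if allergen in row[ALLERGEN_ID]: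
--             rows_with_allergen.append(row)
--
--     # Get counts of ingredients with that allergen
--     ingredient_counts = count_all_items(rows_with_allergen, INGREDIENT_ID)
--
--     # If any ingredients appear in every allergen row, then there is a match
--     n_allergens = len(rows_with_allergen)
--     matching_ingredients = []
--     for key,num in ingredient_counts.items():
--         if n_allergens == num:
--             matching_ingredients.append(key)
--
--     # Return info about matches
--     found_match = False
--     if len(matching_ingredients) > 0:
--         found_match = True
--
--     return (found_match, matching_ingredients)
--
-- def match_allergens_blind(data):
--
--     # Get allergens and sort by most occurences
--     allergen_counts = count_all_items(data, ALLERGEN_ID)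
--     sorted_counts = sorted(allergen_counts.items(), key=operator.itemgetter(1))
--
--     matches = {}
--     for allergen,_ in sorted_counts:
--         match, matching_ingredients = try_identify_allergen_blind(allergen, data)
--         if match:
--             matches[allergen] = matching_ingredients
--
--     # If these lengths match, it means that we have found at least one match for each allergen
--     all_allergens_matched = False
--     if len(matches) == len(allergen_counts):
--         all_allergens_matched = True
--
--     return (all_allergens_matched, matches)
-- ===== SOURCE B (Python) =====
-- def match_allergens_blind(data):
--     # One pass over the data building allergen occurrence counts and, per allergen,
--     # (number of rows containing it, ingredient occurrence counts over those rows);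
--     # then answer each allergen from the index instead of rescanning the data.
--     allergen_counts = {}
--     index = {}  # allergen -> [rows_with_allergen, {ingredient: count}]
--     for ingredients, allergens in data:
--         for a in allergens:
--             allergen_counts[a] = allergen_counts.get(a, 0) + 1
--         for a in dict.fromkeys(allergens):
--             entry = index.setdefault(a, [0, {}])
--             entry[0] += 1
--             ic = entry[1]
--             for ing in ingredients:
--                 ic[ing] = ic.get(ing, 0) + 1
--     matches = {}
--     for a, _ in sorted(allergen_counts.items(), key=lambda kv: kv[1]):
--         n, ic = index[a]
--         matching = [ing for ing, c in ic.items() if c == n]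
--         if matching:
--             matches[a] = matching
--     return (len(matches) == len(allergen_counts), matches)
-- ===== Notes on version B (the rewrite author's own statement) =====
-- stated objective: faster
-- what changed: B makes a single pass over the data building an allergen -> (row count, ingredient counts) index plus the allergen occurrence counts, then answers every allergen from the index, instead of A's rescan of all rows (filter + recount) once per distinct allergen.
import Mathlib
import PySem

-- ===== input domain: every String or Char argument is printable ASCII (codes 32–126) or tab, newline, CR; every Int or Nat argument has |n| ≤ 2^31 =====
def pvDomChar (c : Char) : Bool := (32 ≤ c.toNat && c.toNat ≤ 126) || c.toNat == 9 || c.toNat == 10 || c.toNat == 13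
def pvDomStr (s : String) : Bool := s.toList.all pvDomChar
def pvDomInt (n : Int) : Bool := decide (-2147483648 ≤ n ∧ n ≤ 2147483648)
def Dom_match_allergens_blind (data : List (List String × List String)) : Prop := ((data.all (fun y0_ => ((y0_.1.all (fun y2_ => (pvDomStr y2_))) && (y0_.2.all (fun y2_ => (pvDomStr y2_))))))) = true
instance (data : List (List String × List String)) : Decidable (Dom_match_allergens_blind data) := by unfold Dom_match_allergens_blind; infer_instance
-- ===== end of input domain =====

-- B rebuilds the same answer from a single pass over the data (an allergen → (row count, ingredient counts)
-- index) instead of rescanning all rows once per allergen; objective: faster (asymptotic).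

-- ===== PORT A =====
-- count_all_items(data, id): occurrence counts of the elements of line[id] over all lines
def countAllItems (data : List (List String × List String)) (id : Nat) : PySem.Dict String Int :=
  data.foldl (fun counts line =>
    let item := if id = 0 then line.1 else line.2
    item.foldl (fun counts i =>
      if counts.contains i then counts.insert i (counts.getD i 0 + 1) else counts.insert i 1) counts)
    PySem.Dict.empty

-- try_identify_allergen_blind(allergen, data)
def tryIdentifyAllergenBlind (allergen : String) (data : List (List String × List String)) :
    Bool × List String :=
  let rowsWithAllergen := data.foldl
    (fun acc row => if row.2.contains allergen then acc ++ [row] else acc) []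
  let ingredientCounts := countAllItems rowsWithAllergen 0
  let nAllergens : Int := rowsWithAllergen.length
  let matchingIngredients := ingredientCounts.items.foldl
    (fun acc kv => if nAllergens = kv.2 then acc ++ [kv.1] else acc) []
  let foundMatch := decide (0 < matchingIngredients.length)
  (foundMatch, matchingIngredients)

def match_allergens_blind (data : List (List String × List String)) :
    Bool × (List (String × List String)) :=
  let allergenCounts := countAllItems data 1
  let sortedCounts := PySem.List.sorted allergenCounts.items (fun kv => kv.2) false
  let matchesD := sortedCounts.foldl
    (fun (m : PySem.Dict String (List String)) p =>
      let r := tryIdentifyAllergenBlind p.1 data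
      if r.1 then m.insert p.1 r.2 else m)
    PySem.Dict.empty
  let allAllergensMatched := decide (matchesD.size = allergenCounts.size)
  (allAllergensMatched, matchesD.items)

-- ===== PORT B =====
-- one pass over data: per row, update allergen occurrence counts …
def altRowAcStep (ac : PySem.Dict String Int) (row : List String × List String) :
    PySem.Dict String Int :=
  row.2.foldl (fun ac a => ac.insert a (ac.getD a 0 + 1)) ac

-- … and, for each distinct allergen of the row, its (row count, ingredient counts) entry
def altRowIdxStep (idx : PySem.Dict String (Int × PySem.Dict String Int))
    (row : List String × List String) : PySem.Dict String (Int × PySem.Dict String Int) :=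
  (PySem.List.dedup row.2).foldl (fun idx a =>
    let entry := idx.getD a (0, PySem.Dict.empty)
    idx.insert a (entry.1 + 1,
      row.1.foldl (fun ic ing => ic.insert ing (ic.getD ing 0 + 1)) entry.2)) idx

def altIndexState (data : List (List String × List String)) :
    PySem.Dict String Int × PySem.Dict String (Int × PySem.Dict String Int) :=
  data.foldl (fun st row => (altRowAcStep st.1 row, altRowIdxStep st.2 row))
    (PySem.Dict.empty, PySem.Dict.empty)

def match_allergens_blind_alt (data : List (List String × List String)) :
    Bool × (List (String × List String)) :=
  let st := altIndexState data
  let allergenCounts := st.1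
  let index := st.2
  let matchesD := (PySem.List.sorted allergenCounts.items (fun kv => kv.2) false).foldl
    (fun (m : PySem.Dict String (List String)) p =>
      let e := index.getD p.1 (0, PySem.Dict.empty)
      let matching := (e.2.items.filter (fun kv => kv.2 == e.1)).map (·.1)
      if matching ≠ [] then m.insert p.1 matching else m)
    PySem.Dict.empty
  (decide (matchesD.size = allergenCounts.size), matchesD.items)

-- ===== PRECONDITION & SPEC =====
def Spec_match_allergens_blind (data : List (List String × List String)) (out : Bool × (List (String × List String))) : Prop := out = match_allergens_blind_alt data
instance (data : List (List String × List String)) (out : Bool × (List (String × List String))) : Decidable (Spec_match_allergens_blind data out) := by unfold Spec_match_allergens_blind; infer_instance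

-- ===== CLAIM (what is proved, stated in full; the proofs are below) =====
def Claim_equal_match_allergens_blind : Prop := ∀ (data : List (List String × List String)), Dom_match_allergens_blind data → Spec_match_allergens_blind data (match_allergens_blind data)

-- ===== LEMMAS AND PROOFS =====

-- the shared "counts[x] = counts.get(x,0)+1" step
def icStep (c : PySem.Dict String Int) (i : String) : PySem.Dict String Int :=
  c.insert i (c.getD i 0 + 1)

-- A's branching count step is B's unconditional one
lemma countStep_eq :
    (fun (counts : PySem.Dict String Int) i =>
      if counts.contains i then counts.insert i (counts.getD i 0 + 1) else counts.insert i 1)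
    = icStep := by
  funext c i
  by_cases h : c.contains i = true
  · simp [h, icStep]
  · simp only [Bool.not_eq_true] at h
    simp [h, icStep, PySem.Dict.getD_of_not_contains c 0 h]

-- a fold of inserts over a list not containing a leaves getD a unchanged
lemma getD_foldl_insert_of_not_mem {E : Type} (l : List String) (a : String) (ha : a ∉ l)
    (upd : E → List String → E) (row : List String) (e0 : E)
    (d : PySem.Dict String E) :
    (l.foldl (fun d x => d.insert x (upd (d.getD x e0) row)) d).getD a e0 = d.getD a e0 := by
  induction l generalizing d with
  | nil => rfl
  | cons x t ih =>
      simp only [List.mem_cons, not_or] at ha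
      simp only [List.foldl_cons]
      rw [ih ha.2, PySem.Dict.getD_insert]
      simp [ha.1]

-- effect on getD a of one row's fold over a Nodup key list
lemma getD_foldl_insert_upd {E : Type} (l : List String) (hnd : l.Nodup) (a : String)
    (upd : E → List String → E) (row : List String) (e0 : E)
    (d : PySem.Dict String E) :
    (l.foldl (fun d x => d.insert x (upd (d.getD x e0) row)) d).getD a e0
      = if a ∈ l then upd (d.getD a e0) row else d.getD a e0 := by
  induction l generalizing d with
  | nil => simp
  | cons x t ih =>
      simp only [List.foldl_cons]
      rcases List.nodup_cons.mp hnd with ⟨hx, hnt⟩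
      by_cases hax : a = x
      · subst hax
        rw [getD_foldl_insert_of_not_mem t a hx upd row e0]
        simp
      · rw [ih hnt]
        rw [PySem.Dict.getD_insert]
        simp [hax, List.mem_cons]

-- the per-row entry update B performs
def entryUpd (e : Int × PySem.Dict String Int) (ings : List String) : Int × PySem.Dict String Int :=
  (e.1 + 1, ings.foldl icStep e.2)

-- B's index answers every allergen with a fold over exactly the rows containing it
lemma idx_getD (data : List (List String × List String)) (a : String)
    (d : PySem.Dict String (Int × PySem.Dict String Int)) :
    (data.foldl altRowIdxStep d).getD a (0, PySem.Dict.empty)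
      = ((data.filter (fun row => row.2.contains a)).foldl
          (fun e row => entryUpd e row.1) (d.getD a (0, PySem.Dict.empty))) := by
  induction data generalizing d with
  | nil => rfl
  | cons row t ih =>
      simp only [List.foldl_cons, List.filter_cons]
      rw [ih]
      have hstep : altRowIdxStep d row
          = (PySem.List.dedup row.2).foldl (fun d x =>
              d.insert x (entryUpd (d.getD x (0, PySem.Dict.empty)) row.1)) d := rfl
      rw [hstep]
      rw [getD_foldl_insert_upd (PySem.List.dedup row.2) (PySem.List.nodup_dedup row.2) a
            entryUpd row.1 (0, PySem.Dict.empty) d]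
      by_cases hm : a ∈ row.2
      · simp [hm]
      · simp [hm]

-- splitting the (count, ingredient-counts) fold into its components
lemma foldl_entryUpd (rows : List (List String × List String)) (n0 : Int)
    (c0 : PySem.Dict String Int) :
    rows.foldl (fun e row => entryUpd e row.1) (n0, c0)
      = (n0 + rows.length, rows.foldl (fun c row => row.1.foldl icStep c) c0) := by
  induction rows generalizing n0 c0 with
  | nil => simp
  | cons r t ih =>
      rw [List.foldl_cons,
          show entryUpd (n0, c0) r.1 = (n0 + 1, r.1.foldl icStep c0) from rfl, ih]
      simp only [List.length_cons]
      congr 1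
      push_cast
      ring

-- A's try_identify, characterised through the same filter-fold
lemma foldl_append_if_prop (items : List (String × Int)) (n : Int) :
    items.foldl (fun acc kv => if n = kv.2 then acc ++ [kv.1] else acc) []
      = (items.filter (fun kv => kv.2 == n)).map (·.1) := by
  have h := PySem.List.foldl_append_if (fun (kv : String × Int) => kv.2 == n) (fun kv => kv.1) items []
  simp only [List.nil_append] at h
  rw [← h]
  apply PySem.List.foldl_congr_mem
  intro acc kv _
  by_cases hk : n = kv.2
  · simp [hk]
  · simp [hk, Ne.symm hk]

lemma tryIdentify_eq (allergen : String) (data : List (List String × List String)) :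
    tryIdentifyAllergenBlind allergen data
      = (let rows := data.filter (fun row => row.2.contains allergen)
         let ic := rows.foldl (fun c row => row.1.foldl icStep c) PySem.Dict.empty
         let matching := (ic.items.filter (fun kv => kv.2 == (rows.length : Int))).map (·.1)
         (decide (0 < matching.length), matching)) := by
  unfold tryIdentifyAllergenBlind countAllItems
  rw [PySem.List.foldl_append_if (fun row => row.2.contains allergen) (fun row => row) data []]
  rw [countStep_eq]
  simp only [List.nil_append, List.map_id_fun', id, reduceIte]
  rw [foldl_append_if_prop]

-- B's state components are A's two count structures
lemma altState_fst (data : List (List String × List String)) :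
    (altIndexState data).1 = countAllItems data 1 := by
  unfold altIndexState countAllItems
  rw [countStep_eq]
  rw [PySem.List.foldl_prod_mk altRowAcStep altRowIdxStep data PySem.Dict.empty PySem.Dict.empty]
  apply PySem.List.foldl_congr_mem
  intro acc x _
  rfl

lemma altState_snd_getD (data : List (List String × List String)) (a : String) :
    (altIndexState data).2.getD a (0, PySem.Dict.empty)
      = (let rows := data.filter (fun row => row.2.contains a)
         ((rows.length : Int), rows.foldl (fun c row => row.1.foldl icStep c) PySem.Dict.empty)) := by
  unfold altIndexState
  rw [PySem.List.foldl_prod_mk altRowAcStep altRowIdxStep data PySem.Dict.empty PySem.Dict.empty]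
  rw [idx_getD data a PySem.Dict.empty]
  have h2 := foldl_entryUpd (data.filter (fun row => row.2.contains a)) 0 PySem.Dict.empty
  rw [show ((PySem.Dict.empty : PySem.Dict String (Int × PySem.Dict String Int)).getD a
        (0, PySem.Dict.empty)) = ((0 : Int), (PySem.Dict.empty : PySem.Dict String Int)) from rfl]
  rw [h2]
  simp

-- ===== VERDICT (by name: the statement is the Claim_ definition above) =====
theorem match_allergens_blind_spec : Claim_equal_match_allergens_blind := by
  intro data _
  unfold Spec_match_allergens_blind
  simp only [match_allergens_blind, match_allergens_blind_alt]
  rw [altState_fst]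
  have hfold :
      ∀ (l : List (String × Int)),
        l.foldl (fun (m : PySem.Dict String (List String)) p =>
            let r := tryIdentifyAllergenBlind p.1 data
            if r.1 then m.insert p.1 r.2 else m) PySem.Dict.empty
        = l.foldl (fun (m : PySem.Dict String (List String)) p =>
            let e := (altIndexState data).2.getD p.1 (0, PySem.Dict.empty)
            let matching := (e.2.items.filter (fun kv => kv.2 == e.1)).map (·.1)
            if matching ≠ [] then m.insert p.1 matching else m) PySem.Dict.empty := by
    intro l
    apply PySem.List.foldl_congr_mem
    intro m p _
    rw [tryIdentify_eq, altState_snd_getD]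
    simp only []
    congr 1
    · simp
  rw [hfold]
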